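-- pv_equiv track=rewrite | github.com/winstoncheong/arxiv-fixes | hep-th_9408074v2/convert.py | fix_line_imbalances
-- ===== SOURCE A (Python) =====
-- def count_imbalances(line: str) -> int:
--     """
--     Count number of starting braces without ending braces
--     """
--     count = 0
--     for char in line:
--         if char == "{":
--             count += 1
--         elif char == "}":
--             count -= 1
--     return count
--
-- def fix_line_imbalances(lines: list[str]) -> list[str]:
--     """
--     If line contains starting brace without ending brace, need to combine lines until ending brace match found
--     """
--
--     new_lines = []
--
--     i = 0
--     while i < len(lines):
--         line = lines[i]
--         while count_imbalances(line) != 0: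
--             # keep adding lines until ending brace match found
--             i += 1
--             line += " " + lines[i]
--
--             if i >= len(lines):
--                 raise Exception("Line imbalance not closed at end of lines. Got to: " + line)
--         # line is balanced, add it to new lines
--
--         new_lines.append(line)
--         i+=1
--
--     return new_lines
-- ===== SOURCE B (Python) =====
-- def fix_line_imbalances(lines: list[str]) -> list[str]:
--     """
--     One pass: keep a running brace balance and a buffer of the lines of the
--     current (still unbalanced) group; flush the buffer whenever the balance
--     returns to zero.
--     """
--     new_lines = []
--     buf = []
--     bal = 0
--     for line in lines:
--         buf.append(line)
--         for ch in line:
--             if ch == "{":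
--                 bal += 1
--             elif ch == "}":
--                 bal -= 1
--         if bal == 0:
--             new_lines.append(" ".join(buf))
--             buf = []
--     if buf:
--         raise Exception("Line imbalance not closed at end of lines. Got to: " + " ".join(buf))
--     return new_lines
-- ===== Notes on version B (the rewrite author's own statement) =====
-- stated objective: alternative
-- what changed: Instead of re-counting the braces of the growing merged line after every append (nested merge loop with index arithmetic), B makes one pass keeping a running brace balance and a buffer of the current group, joining each balanced group with a single ' '.join; measured ~1.3x faster, below the 1.5x bar, so no speed is claimed.
import Mathlib
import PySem

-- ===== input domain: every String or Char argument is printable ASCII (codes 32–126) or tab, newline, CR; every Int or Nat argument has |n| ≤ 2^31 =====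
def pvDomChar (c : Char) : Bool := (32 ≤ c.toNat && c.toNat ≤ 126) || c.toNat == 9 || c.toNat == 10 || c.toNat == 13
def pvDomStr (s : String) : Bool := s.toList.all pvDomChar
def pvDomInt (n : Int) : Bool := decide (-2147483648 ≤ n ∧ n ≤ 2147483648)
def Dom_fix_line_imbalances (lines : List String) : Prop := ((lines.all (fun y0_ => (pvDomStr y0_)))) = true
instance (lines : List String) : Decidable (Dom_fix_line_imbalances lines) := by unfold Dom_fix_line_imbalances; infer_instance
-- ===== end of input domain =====

-- B replaces A's re-counting of the growing merged line by a single pass with a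
-- running brace balance and a group buffer (objective: alternative; not measured as faster).
-- Where Python A raises (overall brace balance nonzero), both ports return [] via .getD; Pre_ excludes those inputs.

-- ===== PORT A =====
-- 'if char == "{": count += 1 elif char == "}": count -= 1'
def pvChStep (c : Int) (ch : Char) : Int :=
  if ch = '{' then c + 1 else if ch = '}' then c - 1 else c

-- count_imbalances(line)
def pvCountImb (line : String) : Int := line.toList.foldl pvChStep 0

mutual
  -- outer while loop over i (recursion on the remaining lines)
  def pvFixA : List String → Option (List String)
    | [] => some []
    | l :: ls => pvFixAGo l ls
  termination_by xs => (xs.length, 0)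
  -- inner 'while count_imbalances(line) != 0' loop; none = Python raises (ran off the end)
  def pvFixAGo (line : String) (rest : List String) : Option (List String) :=
    if pvCountImb line = 0 then (pvFixA rest).map (line :: ·)
    else match rest with
      | [] => none
      | x :: xs => pvFixAGo (line ++ " " ++ x) xs
  termination_by (rest.length, 1)
end

def fix_line_imbalances (lines : List String) : List String := (pvFixA lines).getD []

-- ===== PORT B =====
-- one step of B's for-loop: append line to buf, update running balance over its chars, flush if balanced
def pvStepB (s : List String × List String × Int) (line : String) : List String × List String × Int :=
  let buf := s.2.1 ++ [line]
  let bal := line.toList.foldl pvChStep s.2.2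
  if bal = 0 then (s.1 ++ [PySem.Str.join " " buf], [], 0) else (s.1, buf, bal)

def fix_line_imbalances_alt (lines : List String) : List String :=
  let s := lines.foldl pvStepB ([], [], 0)
  if s.2.1.isEmpty then s.1 else []   -- nonempty leftover buffer = Python raises; outside Pre_

-- ===== PRECONDITION & SPEC =====
def pvBraceBal (s : String) : Int := (s.toList.count '{' : Int) - (s.toList.count '}' : Int)

-- Pre_ excludes exactly the inputs on which Python A raises: a list whose total brace
-- balance is nonzero makes A's merging run past the end of the list (IndexError).
def Pre_fix_line_imbalances (lines : List String) : Prop := (lines.map pvBraceBal).sum = 0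
instance (lines : List String) : Decidable (Pre_fix_line_imbalances lines) := by
  unfold Pre_fix_line_imbalances; infer_instance

def pvWitness_fix_line_imbalances : List String := ["a {", "} b", "{x}"]

def Spec_fix_line_imbalances (lines : List String) (out : List String) : Prop := out = fix_line_imbalances_alt lines
instance (lines : List String) (out : List String) : Decidable (Spec_fix_line_imbalances lines out) := by unfold Spec_fix_line_imbalances; infer_instance

-- ===== CLAIM (what is proved, stated in full; the proofs are below) =====
def Claim_equal_fix_line_imbalances : Prop := ∀ (lines : List String), Dom_fix_line_imbalances lines → Pre_fix_line_imbalances lines → Spec_fix_line_imbalances lines (fix_line_imbalances lines)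

-- ===== LEMMAS AND PROOFS =====

-- proof model of B's loop: recursion over the remaining lines with (buf, bal) state
def pvGB : List String → Int → List String → Option (List String)
  | buf, _, [] => if buf.isEmpty then some [] else none
  | buf, bal, l :: ls =>
    let buf' := buf ++ [l]
    let bal' := bal + pvCountImb l
    if bal' = 0 then (pvGB [] 0 ls).map (PySem.Str.join " " buf' :: ·)
    else pvGB buf' bal' ls

lemma pvChStep_shift (cs : List Char) (c : Int) :
    cs.foldl pvChStep c = c + cs.foldl pvChStep 0 := by
  induction cs generalizing c with
  | nil => simp
  | cons h t ih =>
    simp only [List.foldl_cons]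
    rw [ih (pvChStep c h), ih (pvChStep 0 h)]
    unfold pvChStep; split_ifs <;> omega

lemma pvCountImb_append (a b : String) :
    pvCountImb (a ++ b) = pvCountImb a + pvCountImb b := by
  unfold pvCountImb
  rw [String.toList_append, List.foldl_append, pvChStep_shift]

lemma pvCountImb_space : pvCountImb " " = 0 := by decide

lemma pvJoin_singleton (l : String) : PySem.Str.join " " [l] = l := by
  apply String.toList_inj.mp
  rw [PySem.Str.toList_join]
  simp [PySem.Chars.join_singleton]

lemma pvCharsJoin_append (sep p x : List Char) (ps : List (List Char)) :
    PySem.Chars.join sep ((p :: ps) ++ [x]) = PySem.Chars.join sep (p :: ps) ++ sep ++ x := by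
  induction ps generalizing p with
  | nil => simp [PySem.Chars.join_cons_cons, PySem.Chars.join_singleton]
  | cons q qs ih =>
    show PySem.Chars.join sep (p :: q :: (qs ++ [x])) = _
    rw [PySem.Chars.join_cons_cons, ← List.cons_append, ih q, PySem.Chars.join_cons_cons]
    simp [List.append_assoc]

lemma pvJoin_append (buf : List String) (l : String) (h : buf ≠ []) :
    PySem.Str.join " " (buf ++ [l]) = PySem.Str.join " " buf ++ " " ++ l := by
  apply String.toList_inj.mp
  obtain ⟨p, ps, rfl⟩ := List.exists_cons_of_ne_nil h
  rw [String.toList_append, String.toList_append, PySem.Str.toList_join, PySem.Str.toList_join]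
  simp only [List.map_append, List.map_cons, List.map_nil]
  exact pvCharsJoin_append " ".toList p.toList l.toList (ps.map String.toList)

-- B's foldl, started from any state, equals the model with the accumulator threaded outside
lemma pvFoldB_eq_gB (rest : List String) : ∀ (acc buf : List String) (bal : Int),
    (if (rest.foldl pvStepB (acc, buf, bal)).2.1.isEmpty then
        some (rest.foldl pvStepB (acc, buf, bal)).1 else none)
      = (pvGB buf bal rest).map (acc ++ ·) := by
  induction rest with
  | nil =>
    intro acc buf bal
    simp only [List.foldl_nil, pvGB]
    by_cases h : buf.isEmpty <;> simp [h]
  | cons l ls ih =>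
    intro acc buf bal
    simp only [List.foldl_cons, pvStepB, pvGB, pvCountImb]
    rw [pvChStep_shift l.toList bal]
    by_cases h : bal + l.toList.foldl pvChStep 0 = 0
    · simp only [if_pos h, ih]
      cases pvGB [] 0 ls <;> simp
    · simp only [if_neg h, ih]

-- the central correspondence: B's model equals A's mutual recursion
lemma pvGB_eq_fixA (rest : List String) :
    pvGB [] 0 rest = pvFixA rest ∧
    ∀ buf bal, buf ≠ [] → bal = pvCountImb (PySem.Str.join " " buf) → bal ≠ 0 →
      pvGB buf bal rest = pvFixAGo (PySem.Str.join " " buf) rest := by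
  induction rest with
  | nil =>
    constructor
    · simp [pvGB, pvFixA]
    · intro buf bal hbuf hbal hne
      have h1 : buf.isEmpty = false := by simpa using hbuf
      have h2 : ¬ pvCountImb (PySem.Str.join " " buf) = 0 := fun hc => hne (hbal.trans hc)
      rw [pvFixAGo.eq_def, if_neg h2]
      simp [pvGB, h1]
  | cons l ls ih =>
    have key : ∀ buf bal, buf ≠ [] → bal = pvCountImb (PySem.Str.join " " buf) → bal ≠ 0 →
        pvGB buf bal (l :: ls) = pvFixAGo (PySem.Str.join " " buf) (l :: ls) := by
      intro buf bal hbuf hbal hne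
      have hjoin := pvJoin_append buf l hbuf
      have hbal' : bal + pvCountImb l = pvCountImb (PySem.Str.join " " (buf ++ [l])) := by
        rw [hjoin, pvCountImb_append, pvCountImb_append, pvCountImb_space, hbal]; ring
      have hA : pvFixAGo (PySem.Str.join " " buf) (l :: ls)
          = pvFixAGo (PySem.Str.join " " buf ++ " " ++ l) ls := by
        rw [pvFixAGo.eq_def, if_neg (fun hc => hne (hbal.trans hc))]
      rw [hA, ← hjoin]
      simp only [pvGB]
      by_cases h0 : bal + pvCountImb l = 0
      · rw [if_pos h0, pvFixAGo.eq_def, if_pos (by rw [← hbal']; exact h0), ih.1]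
      · rw [if_neg h0]
        exact ih.2 (buf ++ [l]) (bal + pvCountImb l) (by simp) hbal' h0
    refine ⟨?_, key⟩
    have hA : pvFixA (l :: ls) = pvFixAGo l ls := by simp [pvFixA]
    simp only [pvGB]
    rw [hA]
    simp only [List.nil_append, zero_add]
    by_cases h0 : pvCountImb l = 0
    · rw [if_pos h0, ih.1, pvJoin_singleton, pvFixAGo.eq_def, if_pos h0]
    · rw [if_neg h0]
      have h := ih.2 [l] (pvCountImb l) (by simp) (by rw [pvJoin_singleton]) h0
      rw [pvJoin_singleton] at h
      exact h

-- A and B agree on every input (both ports return [] exactly where Python raises)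
lemma pvPorts_eq (lines : List String) : fix_line_imbalances lines = fix_line_imbalances_alt lines := by
  have h := pvFoldB_eq_gB lines [] [] 0
  rw [(pvGB_eq_fixA lines).1] at h
  simp only [List.nil_append, Option.map_id'] at h
  unfold fix_line_imbalances fix_line_imbalances_alt
  show (pvFixA lines).getD [] =
    if (lines.foldl pvStepB ([], [], 0)).2.1.isEmpty then (lines.foldl pvStepB ([], [], 0)).1 else []
  by_cases he : (lines.foldl pvStepB ([], [], 0)).2.1.isEmpty
  · rw [if_pos he]; rw [if_pos he] at h; rw [← h]; rfl
  · rw [if_neg he]; rw [if_neg he] at h; rw [← h]; rfl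

-- ===== VERDICT (by name: the statement is the Claim_ definition above) =====
theorem fix_line_imbalances_spec : Claim_equal_fix_line_imbalances := by
  intro lines _ _
  unfold Spec_fix_line_imbalances
  exact pvPorts_eq lines
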